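-- pv_equiv track=rewrite | github.com/Cosmin1490/DysonSphereProgram-BlueprintGenerator | DysonSphereLayer.py | compute_capacity
-- ===== SOURCE A (Python) =====
-- def compute_capacity(n: int) -> int:
--     if n < 64:
--         return 64
--     else:
--         power_of_two = 1
--         while (power_of_two * 64) <= n:
--             power_of_two *= 2
--         return power_of_two * 64
-- ===== SOURCE B (Python) =====
-- def compute_capacity(n: int) -> int:
--     if n < 64:
--         return 64
--     return 64 << (n // 64).bit_length()
-- ===== Notes on version B (the rewrite author's own statement) =====
-- stated objective: simpler
-- what changed: Replaces the doubling while-loop with a closed form: in the else branch, return the block size shifted left by the bit length of the quotient of n by the block size, which is the smallest power-of-two multiple of the block size strictly exceeding n.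
import Mathlib
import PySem

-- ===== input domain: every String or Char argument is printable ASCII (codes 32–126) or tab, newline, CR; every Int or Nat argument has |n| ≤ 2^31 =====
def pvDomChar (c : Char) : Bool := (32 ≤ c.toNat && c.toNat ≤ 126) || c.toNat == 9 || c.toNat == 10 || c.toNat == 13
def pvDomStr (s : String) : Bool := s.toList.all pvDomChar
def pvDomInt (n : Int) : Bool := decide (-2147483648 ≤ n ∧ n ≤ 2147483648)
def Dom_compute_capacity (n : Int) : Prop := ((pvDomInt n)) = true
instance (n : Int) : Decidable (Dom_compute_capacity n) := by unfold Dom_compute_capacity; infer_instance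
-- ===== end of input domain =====

-- B replaces A's doubling while-loop by a closed form via bit_length (objective: simpler).

-- ===== PORT A =====
-- the while-loop of A: doubles p while p * 64 <= n; p stays a positive power of two,
-- the positivity hypothesis is carried only to justify termination
def capLoopA (n : Int) (p : Nat) (hp : 0 < p) : Nat :=
  if h : (p : Int) * 64 ≤ n then capLoopA n (p * 2) (by omega) else p
termination_by (n + 64 - (p : Int) * 64).toNat
decreasing_by push_cast; omega

def compute_capacity (n : Int) : Int :=
  if n < 64 then 64
  else (capLoopA n 1 (by omega) : Int) * 64

-- ===== PORT B =====
-- '64 << k' is ported as 64 * 2 ^ k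
def compute_capacity_alt (n : Int) : Int :=
  if n < 64 then 64
  else 64 * 2 ^ PySem.Int.bitLength (PySem.Int.floordiv n 64)

-- ===== PRECONDITION & SPEC =====
def Spec_compute_capacity (n : Int) (out : Int) : Prop := out = compute_capacity_alt n
instance (n : Int) (out : Int) : Decidable (Spec_compute_capacity n out) := by unfold Spec_compute_capacity; infer_instance

-- ===== CLAIM (what is proved, stated in full; the proofs are below) =====
def Claim_equal_compute_capacity : Prop := ∀ (n : Int), Dom_compute_capacity n → Spec_compute_capacity n (compute_capacity n)

-- ===== LEMMAS AND PROOFS =====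

-- the loop, started at a power of two 2^j not above the final power 2^s, returns 2^s,
-- where s = bitLength (n // 64)
lemma capLoopA_eq (n : Int) (hn : 64 ≤ n) :
    ∀ (k j : Nat) (p : Nat) (hp : 0 < p), p = 2 ^ j →
      j + k = PySem.Int.bitLength (PySem.Int.floordiv n 64) →
      capLoopA n p hp = 2 ^ (j + k) := by
  set m : Int := PySem.Int.floordiv n 64 with hm
  have hbounds : m * 64 ≤ n ∧ n < (m + 1) * 64 :=
    (PySem.Int.floordiv_eq_iff_of_pos (by omega)).mp hm.symm
  have hm1 : 1 ≤ m := by nlinarith [hbounds.1, hbounds.2]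
  have habs : (m.natAbs : Int) = m := Int.natAbs_of_nonneg (by omega)
  intro k
  induction k with
  | zero =>
    intro j p hp hpj hjs
    -- loop exits: n < 2^s * 64
    have hlt : m.natAbs < 2 ^ PySem.Int.bitLength m := PySem.Int.lt_two_pow_bitLength m
    have hstop : ¬ ((p : Int) * 64 ≤ n) := by
      have hmlt : m < (2 : Int) ^ PySem.Int.bitLength m := by
        have h2 : ((m.natAbs : Int)) < ((2 ^ PySem.Int.bitLength m : Nat) : Int) := by
          exact_mod_cast hlt
        rw [habs] at h2; exact_mod_cast h2
      have hp2 : (p : Int) = 2 ^ PySem.Int.bitLength m := by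
        rw [hpj, ← hjs]; push_cast; ring_nf
      nlinarith [hbounds.2]
    rw [capLoopA.eq_def, dif_neg hstop, hpj]
    norm_num
  | succ k ih =>
    intro j p hp hpj hjs
    -- loop continues: 2^j * 64 ≤ n since j < s, hence 2^j ≤ 2^(s-1) ≤ m
    have hne : m ≠ 0 := by omega
    have hlow : 2 ^ (PySem.Int.bitLength m - 1) ≤ m.natAbs :=
      PySem.Int.two_pow_bitLength_le m hne
    have hjle : 2 ^ j ≤ m.natAbs := by
      calc 2 ^ j ≤ 2 ^ (PySem.Int.bitLength m - 1) := Nat.pow_le_pow_right (by omega) (by omega)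
        _ ≤ m.natAbs := hlow
    have hcont : (p : Int) * 64 ≤ n := by
      have : (p : Int) ≤ m := by
        have h2 : ((p : Int)) ≤ ((m.natAbs : Int)) := by rw [hpj]; exact_mod_cast hjle
        rwa [habs] at h2
      nlinarith [hbounds.1]
    rw [capLoopA.eq_def, dif_pos hcont]
    have := ih (j + 1) (p * 2) (by omega) (by rw [hpj]; ring) (by omega)
    rw [this]
    congr 1
    omega

-- ===== VERDICT (by name: the statement is the Claim_ definition above) =====
theorem compute_capacity_spec : Claim_equal_compute_capacity := by
  intro n _
  unfold Spec_compute_capacity compute_capacity compute_capacity_alt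
  by_cases h : n < 64
  · simp [h]
  · have hn : 64 ≤ n := by omega
    simp only [if_neg h]
    have := capLoopA_eq n hn (PySem.Int.bitLength (PySem.Int.floordiv n 64)) 0 1 (by omega)
      (by norm_num) (by omega)
    rw [this]
    push_cast
    ring
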